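-- pv_equiv track=rewrite | github.com/khangtc61785/best_choose_delivery | solution.py | sort_close_customer
-- ===== SOURCE A (Python) =====
-- def sort_close_customer(order_location, locations):
--     """[summary]
--
--     Args:
--         order_location ([type]): [description]
--         locations ([type]): [description]
--
--     Returns:
--         [type]: [description]
--     """
--     len_locations = len(locations)
--     # Fisrt location is order location
--     output = [order_location]
--     order_location_index = locations.index(order_location)
--     before = order_location_index - 1
--     after = order_location_index + 1
--     while before > -1 or after < len_locations:
--         if before > -1:
--             output.append(locations[before])
--             before -= 1
--         if after < len_locations:
--             output.append(locations[after])
--             after += 1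
--     return output
-- ===== SOURCE B (Python) =====
-- def sort_close_customer(order_location, locations):
--     idx = locations.index(order_location)
--     left = locations[:idx][::-1]
--     right = locations[idx + 1:]
--     out = [order_location]
--     for a, b in zip(left, right):
--         out += [a, b]
--     m = min(len(left), len(right))
--     return out + left[m:] + right[m:]
-- ===== Notes on version B (the rewrite author's own statement) =====
-- stated objective: simpler
-- what changed: Replaces A's two-pointer while-loop with dual in-loop bounds checks by slicing the list around the found index and interleaving the reversed left slice with the right slice via zip plus the leftover tails.
import Mathlib
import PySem

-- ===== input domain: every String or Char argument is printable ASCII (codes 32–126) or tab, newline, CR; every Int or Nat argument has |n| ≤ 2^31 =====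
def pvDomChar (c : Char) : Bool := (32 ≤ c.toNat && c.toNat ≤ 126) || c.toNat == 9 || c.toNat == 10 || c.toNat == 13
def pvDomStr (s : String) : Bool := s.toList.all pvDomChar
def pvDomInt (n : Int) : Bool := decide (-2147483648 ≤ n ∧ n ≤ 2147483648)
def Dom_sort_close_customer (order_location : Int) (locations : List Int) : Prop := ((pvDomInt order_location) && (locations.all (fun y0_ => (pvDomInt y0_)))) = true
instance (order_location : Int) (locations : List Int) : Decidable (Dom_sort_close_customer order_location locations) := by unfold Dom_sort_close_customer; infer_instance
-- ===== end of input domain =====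

-- B replaces A's two-pointer while-loop by slicing the list around the order's index and
-- interleaving the reversed left part with the right part via zip (objective: simpler).

-- ===== PORT A =====
-- the while loop: state (output, before, after); the two `if`s inside one iteration are kept
-- in order (before is read and decremented first, then after).  `before`/`after` are always
-- in range when read (0 ≤ before < len, 0 ≤ after < len under the guard), so
-- `(pyGet? …).getD 0` is exact where Python reads `locations[…]`.
def sortCloseLoop (locations : List Int) (n : Int) :
    Nat → List Int → Int → Int → List Int
  | 0, output, _, _ => output   -- fuel exhausted; unreachable when called with the measure below
  | fuel + 1, output, before, after =>
    if before > -1 ∨ after < n then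
      if before > -1 then
        if after < n then
          sortCloseLoop locations n fuel
            (output ++ [(PySem.List.pyGet? locations before).getD 0]
                    ++ [(PySem.List.pyGet? locations after).getD 0])
            (before - 1) (after + 1)
        else
          sortCloseLoop locations n fuel
            (output ++ [(PySem.List.pyGet? locations before).getD 0]) (before - 1) after
      else
        if after < n then
          sortCloseLoop locations n fuel
            (output ++ [(PySem.List.pyGet? locations after).getD 0]) before (after + 1)
        else output
    else output

def sort_close_customer (order_location : Int) (locations : List Int) : List Int :=
  let len_locations : Int := PySem.List.len locations
  let output := [order_location]
  match PySem.List.index? locations order_location with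
  | none => []   -- Python raises ValueError here; excluded by Pre_
  | some order_location_index =>
    let before := (order_location_index : Int) - 1
    let after := (order_location_index : Int) + 1
    sortCloseLoop locations len_locations ((before + 1).toNat + (len_locations - after).toNat)
      output before after

-- ===== PORT B =====
-- `locations[:idx][::-1]` / `locations[idx+1:]` are `take`/`drop` + reverse (bounds are
-- nonnegative and in range, so the slices are exact); the `for a, b in zip(...)` loop is a foldl.
def sort_close_customer_alt (order_location : Int) (locations : List Int) : List Int :=
  match PySem.List.index? locations order_location with
  | none => []   -- Python raises ValueError here; excluded by Pre_
  | some idx =>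
    let left := (locations.take idx).reverse
    let right := locations.drop (idx + 1)
    let out := (left.zip right).foldl (fun acc p => acc ++ [p.1, p.2]) [order_location]
    let m := min left.length right.length
    out ++ left.drop m ++ right.drop m

-- ===== PRECONDITION & SPEC =====
-- Pre_ excludes exactly the inputs where Python's locations.index(order_location) raises ValueError.
def Pre_sort_close_customer (order_location : Int) (locations : List Int) : Prop :=
  order_location ∈ locations
instance (order_location : Int) (locations : List Int) : Decidable (Pre_sort_close_customer order_location locations) := by unfold Pre_sort_close_customer; infer_instance

def pvWitness_sort_close_customer : Int × List Int := (3, [1, 2, 3, 4, 5])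

def Spec_sort_close_customer (order_location : Int) (locations : List Int) (out : List Int) : Prop := out = sort_close_customer_alt order_location locations
instance (order_location : Int) (locations : List Int) (out : List Int) : Decidable (Spec_sort_close_customer order_location locations out) := by unfold Spec_sort_close_customer; infer_instance

-- ===== CLAIM (what is proved, stated in full; the proofs are below) =====
def Claim_equal_sort_close_customer : Prop := ∀ (order_location : Int) (locations : List Int), Dom_sort_close_customer order_location locations → Pre_sort_close_customer order_location locations → Spec_sort_close_customer order_location locations (sort_close_customer order_location locations)

-- ===== LEMMAS AND PROOFS =====

lemma getD_in_range (xs : List Int) (i : Int) (h0 : 0 ≤ i) (h : i.toNat < xs.length) :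
    (PySem.List.pyGet? xs i).getD 0 = xs[i.toNat] := by
  have hh : i < (xs.length : Int) := by omega
  simp [PySem.List.pyGet?, PySem.List.pyIdx?, h0, hh]

/-- The common shape of both outputs: interleave two lists, head of the first first. -/
def pvInterleave : List Int → List Int → List Int
  | [], ys => ys
  | xs, [] => xs
  | x :: xs, y :: ys => x :: y :: pvInterleave xs ys

lemma pvInterleave_nil_right (xs : List Int) : pvInterleave xs [] = xs := by
  cases xs <;> rfl

/-- Interleaving is zip-flatten plus the leftovers past the shorter length. -/
lemma pvInterleave_eq_zip (xs : List Int) : ∀ ys : List Int,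
    pvInterleave xs ys =
      (xs.zip ys).flatMap (fun p => [p.1, p.2])
        ++ xs.drop (min xs.length ys.length) ++ ys.drop (min xs.length ys.length) := by
  induction xs with
  | nil => intro ys; simp [pvInterleave]
  | cons x xs ih =>
    intro ys
    cases ys with
    | nil => simp [pvInterleave_nil_right]
    | cons y ys => simp [pvInterleave, ih ys, Nat.succ_min_succ]

lemma take_rev_succ (xs : List Int) (k : Nat) (h : k < xs.length) :
    (xs.take (k + 1)).reverse = xs[k] :: (xs.take k).reverse := by
  rw [List.take_add_one, List.getElem?_eq_getElem h]
  simp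

/-- A's loop appends the interleaving of the reversed prefix below `before + 1`
    with the suffix from `after`. -/
lemma sortCloseLoop_eq (locations : List Int) :
    ∀ (fuel : Nat) (before after : Int) (output : List Int),
      (before + 1).toNat + (((locations.length : Int)) - after).toNat ≤ fuel →
      -1 ≤ before → before < (locations.length : Int) →
      0 ≤ after → after ≤ (locations.length : Int) →
      sortCloseLoop locations (locations.length : Int) fuel output before after =
        output ++ pvInterleave ((locations.take (before + 1).toNat).reverse)
                               (locations.drop after.toNat) := by
  intro fuel
  induction fuel with
  | zero =>
    intro b a out hk hb1 hb2 ha1 ha2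
    have hbt : (b + 1).toNat = 0 := by omega
    have hae : a.toNat = locations.length := by omega
    rw [sortCloseLoop, hbt, hae]
    simp [pvInterleave]
  | succ fuel ih =>
    intro b a out hk hb1 hb2 ha1 ha2
    rw [sortCloseLoop]
    by_cases hb : b > -1
    · have hbn : b.toNat < locations.length := by omega
      have hb1t : (b + 1).toNat = b.toNat + 1 := by omega
      by_cases ha : a < (locations.length : Int)
      · have han : a.toNat < locations.length := by omega
        rw [if_pos (Or.inl hb), if_pos hb, if_pos ha,
            ih _ _ _ (by omega) (by omega) (by omega) (by omega) (by omega)]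
        rw [getD_in_range _ _ (by omega) hbn, getD_in_range _ _ (by omega) han]
        have h1 : (b - 1 + 1).toNat = b.toNat := by omega
        have h2 : (a + 1).toNat = a.toNat + 1 := by omega
        rw [h1, h2, hb1t, take_rev_succ _ _ hbn,
            List.drop_eq_getElem_cons han]
        simp [pvInterleave]
      · rw [if_pos (Or.inl hb), if_pos hb, if_neg ha,
            ih _ _ _ (by omega) (by omega) (by omega) (by omega) (by omega)]
        have hae : a.toNat = locations.length := by omega
        have h1 : (b - 1 + 1).toNat = b.toNat := by omega
        rw [getD_in_range _ _ (by omega) hbn, h1, hb1t, take_rev_succ _ _ hbn, hae]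
        simp [pvInterleave_nil_right]
    · have hbt : (b + 1).toNat = 0 := by omega
      by_cases ha : a < (locations.length : Int)
      · have han : a.toNat < locations.length := by omega
        rw [if_pos (Or.inr ha), if_neg hb, if_pos ha,
            ih _ _ _ (by omega) (by omega) (by omega) (by omega) (by omega)]
        have h2 : (a + 1).toNat = a.toNat + 1 := by omega
        rw [getD_in_range _ _ (by omega) han, hbt, h2, List.drop_eq_getElem_cons han]
        simp [pvInterleave]
      · rw [if_neg (by tauto)]
        have hae : a.toNat = locations.length := by omega
        rw [hbt, hae]
        simp [pvInterleave]

-- ===== VERDICT (by name: the statement is the Claim_ definition above) =====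
theorem sort_close_customer_spec : Claim_equal_sort_close_customer := by
  intro o locs _ hpre
  unfold Spec_sort_close_customer
  obtain ⟨i, hi⟩ : ∃ i, PySem.List.index? locs o = some i := by
    cases hidx : PySem.List.index? locs o with
    | some i => exact ⟨i, rfl⟩
    | none => simp [PySem.List.index?_eq_idxOf?] at hidx; simp_all [Pre_sort_close_customer]
  obtain ⟨hk, -, -⟩ := PySem.List.getElem_of_index?_eq_some hi
  -- rewrite A through the loop lemma
  have hA : sort_close_customer o locs =
      [o] ++ pvInterleave ((locs.take i).reverse) (locs.drop (i + 1)) := by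
    simp only [sort_close_customer, hi]
    rw [show PySem.List.len locs = (locs.length : Int) from rfl,
        sortCloseLoop_eq locs _ ((i : Int) - 1) ((i : Int) + 1) [o] (le_refl _)
          (by omega) (by omega) (by omega) (by omega)]
    have h1 : ((i : Int) - 1 + 1).toNat = i := by omega
    have h2 : ((i : Int) + 1).toNat = i + 1 := by omega
    rw [h1, h2]
  -- rewrite B through the zip characterisation
  rw [hA]
  simp only [sort_close_customer_alt, hi, PySem.List.foldl_append_eq_flatMap]
  rw [pvInterleave_eq_zip]
  simp [List.append_assoc]
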